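-- pv_equiv track=rewrite | github.com/ishandutta2007/challenges | hacker_rank/collections-counter.py | rakein
-- ===== SOURCE A (Python) =====
-- from collections import Counter
--
-- def rakein(shoes, customers):
--     inventory = Counter(shoes)
--     total = 0
--     for p in customers:
--         if inventory[p[0]] == 0:
--             continue
--         inventory[p[0]] -= 1
--         total += p[1]
--     return total
-- ===== SOURCE B (Python) =====
-- from collections import Counter
--
-- def rakein(shoes, customers):
--     stock = Counter(shoes)
--     total = 0
--     for size in set(c[0] for c in customers):
--         prices = [p for s, p in customers if s == size]
--         total += sum(prices[:stock[size]])
--     return total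
-- ===== Notes on version B (the rewrite author's own statement) =====
-- stated objective: alternative
-- what changed: Replaces the single streaming pass that decrements a mutable inventory counter per customer with a group-then-aggregate decomposition: for each distinct shoe size, collect that size's requested prices in order and sum the first stock[size] of them.
import Mathlib
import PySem

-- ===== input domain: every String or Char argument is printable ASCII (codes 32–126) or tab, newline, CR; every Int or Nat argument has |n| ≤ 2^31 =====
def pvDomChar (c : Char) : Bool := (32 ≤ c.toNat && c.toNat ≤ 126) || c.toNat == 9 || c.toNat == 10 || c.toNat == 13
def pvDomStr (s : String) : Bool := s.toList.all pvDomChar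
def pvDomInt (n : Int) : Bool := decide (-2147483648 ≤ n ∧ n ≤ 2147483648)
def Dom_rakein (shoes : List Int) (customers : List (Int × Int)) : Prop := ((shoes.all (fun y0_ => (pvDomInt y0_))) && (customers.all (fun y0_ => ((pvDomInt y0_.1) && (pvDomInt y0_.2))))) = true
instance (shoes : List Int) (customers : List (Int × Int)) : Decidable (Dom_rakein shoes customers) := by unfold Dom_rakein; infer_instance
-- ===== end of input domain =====

-- B replaces A's streaming inventory-decrement pass with a group-then-aggregate decomposition (per distinct size, sum the first stock[size] requested prices); alternative decomposition, same results.


-- ===== PORT A =====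
def rakein (shoes : List Int) (customers : List (Int × Int)) : Int :=
  let inventory := PySem.Dict.counter shoes
  (customers.foldl
    (fun st p =>
      if st.1.getD p.1 0 = 0 then st
      else (st.1.modify p.1 0 (· - 1), st.2 + p.2))
    (inventory, (0 : Int))).2

-- ===== PORT B =====
-- iterates over set(sizes): the result is a sum, so it does not depend on the set's iteration order
def rakein_alt (shoes : List Int) (customers : List (Int × Int)) : Int :=
  let stock := PySem.Dict.counter shoes
  (PySem.Set.ofList (customers.map Prod.fst)).foldl
    (fun total size =>
      let prices := (customers.filter (fun c => c.1 == size)).map Prod.snd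
      total + (PySem.List.slice prices none (some (stock.getD size 0))).sum)
    0

-- ===== PRECONDITION & SPEC =====
def Spec_rakein (shoes : List Int) (customers : List (Int × Int)) (out : Int) : Prop := out = rakein_alt shoes customers
instance (shoes : List Int) (customers : List (Int × Int)) (out : Int) : Decidable (Spec_rakein shoes customers out) := by unfold Spec_rakein; infer_instance

-- ===== CLAIM (what is proved, stated in full; the proofs are below) =====
def Claim_equal_rakein : Prop := ∀ (shoes : List Int) (customers : List (Int × Int)), Dom_rakein shoes customers → Spec_rakein shoes customers (rakein shoes customers)

-- ===== LEMMAS AND PROOFS =====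

-- per-size contribution: the first (inv[s]) prices requested for size s
def sizeSum (inv : PySem.Dict Int Int) (cs : List (Int × Int)) (s : Int) : Int :=
  (List.take (inv.getD s 0).toNat ((cs.filter (fun c => c.1 == s)).map Prod.snd)).sum

lemma sum_map_indicator (s0 p0 : Int) (g : Int → Int) :
    ∀ (S : List Int), S.Nodup → s0 ∈ S →
      (S.map (fun s => if s = s0 then g s + p0 else g s)).sum = (S.map g).sum + p0 := by
  intro S
  induction S with
  | nil => intro _ h; cases h
  | cons a S ih =>
      intro hnd hmem
      rcases List.nodup_cons.mp hnd with ⟨ha, hndS⟩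
      rcases List.mem_cons.mp hmem with h | h
      · subst h
        have hrest : (S.map (fun s => if s = s0 then g s + p0 else g s)) = S.map g := by
          apply List.map_congr_left
          intro x hx
          have hxa : x ≠ s0 := fun he => ha (he ▸ hx)
          simp [hxa]
        simp [hrest]
        ring
      · have hne : a ≠ s0 := fun hh => ha (hh ▸ h)
        simp only [List.map_cons, List.sum_cons, if_neg hne, ih hndS h]
        ring

-- loop invariant: A's streaming fold equals the grouped per-size sums over any nodup cover S
lemma loopA_eq (customers : List (Int × Int)) :
    ∀ (inv : PySem.Dict Int Int) (total : Int) (S : List Int),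
      S.Nodup → (∀ c ∈ customers, c.1 ∈ S) → (∀ s, 0 ≤ inv.getD s 0) →
      (customers.foldl
        (fun st p =>
          if st.1.getD p.1 0 = 0 then st
          else (st.1.modify p.1 0 (· - 1), st.2 + p.2))
        (inv, total)).2
      = total + (S.map (sizeSum inv customers)).sum := by
  induction customers with
  | nil =>
      intro inv total S _ _ _
      have hz : ∀ s ∈ S, sizeSum inv [] s = 0 := by
        intro s _; simp [sizeSum]
      rw [List.foldl_nil, List.map_congr_left hz]
      simp
  | cons c rest ih =>
      intro inv total S hnd hcov hinv
      obtain ⟨s0, p0⟩ := c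
      have hcov' : ∀ c ∈ rest, c.1 ∈ S := fun c hc => hcov c (List.mem_cons_of_mem _ hc)
      rw [List.foldl_cons]
      by_cases h0 : inv.getD s0 0 = 0
      · -- size exhausted: customer skipped; the per-size sums agree pointwise
        rw [if_pos h0, ih inv total S hnd hcov' hinv]
        congr 1
        apply congrArg
        apply List.map_congr_left
        intro s _
        by_cases hs : s0 = s
        · subst hs
          simp [sizeSum, h0]
        · have hbe : ¬ (s0 == s) = true := by simpa using hs
          simp [sizeSum, hbe]
      · -- size in stock: customer served; extract p0 from the s0 group
        have hpos : 0 < inv.getD s0 0 := lt_of_le_of_ne (hinv s0) (Ne.symm h0)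
        have hinv' : ∀ s, 0 ≤ (inv.modify s0 0 (· - 1)).getD s 0 := by
          intro s
          rw [PySem.Dict.getD_modify]
          split
          · omega
          · exact hinv s
        rw [if_neg h0, ih (inv.modify s0 0 (· - 1)) (total + p0) S hnd hcov' hinv']
        have hpt : ∀ s ∈ S, sizeSum inv ((s0, p0) :: rest) s
            = if s = s0 then sizeSum (inv.modify s0 0 (· - 1)) rest s + p0
              else sizeSum (inv.modify s0 0 (· - 1)) rest s := by
          intro s _
          by_cases hs : s = s0
          · subst hs
            have hk : (inv.getD s 0).toNat = ((inv.getD s 0 - 1).toNat) + 1 := by omega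
            rw [if_pos rfl]
            simp only [sizeSum, List.filter_cons, PySem.Dict.getD_modify]
            simp only [show (((s, p0).1 == s) = true) from by simp, if_pos, List.map_cons]
            rw [hk, List.take_succ_cons, List.sum_cons]
            ring
          · have hbe : ¬ (s0 == s) = true := by simpa using fun hh => hs hh.symm
            simp [sizeSum, PySem.Dict.getD_modify, hs, hbe]
        calc total + p0 + (S.map (sizeSum (inv.modify s0 0 (· - 1)) rest)).sum
            = total + ((S.map (sizeSum (inv.modify s0 0 (· - 1)) rest)).sum + p0) := by ring
          _ = total + (S.map (fun s => if s = s0 then sizeSum (inv.modify s0 0 (· - 1)) rest s + p0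
                else sizeSum (inv.modify s0 0 (· - 1)) rest s)).sum := by
                rw [sum_map_indicator s0 p0 _ S hnd (hcov (s0, p0) (List.mem_cons_self))]
          _ = total + (S.map (sizeSum inv ((s0, p0) :: rest))).sum := by
                congr 1
                apply congrArg
                exact (List.map_congr_left hpt).symm

-- B's fold over the size set is the mapped sum of per-size contributions
lemma altB_eq (shoes : List Int) (customers : List (Int × Int)) :
    rakein_alt shoes customers
      = ((PySem.Set.ofList (customers.map Prod.fst)).map
          (sizeSum (PySem.Dict.counter shoes) customers)).sum := by
  unfold rakein_alt
  have hgen : ∀ (S : List Int) (t : Int),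
      S.foldl (fun total size =>
        total + (PySem.List.slice ((customers.filter (fun c => c.1 == size)).map Prod.snd)
          none (some ((PySem.Dict.counter shoes).getD size 0))).sum) t
      = t + (S.map (sizeSum (PySem.Dict.counter shoes) customers)).sum := by
    intro S
    induction S with
    | nil => intro t; simp
    | cons a S ih =>
        intro t
        have hnn : (0 : Int) ≤ (PySem.Dict.counter shoes).getD a 0 := by
          rw [PySem.Dict.getD_counter]
          exact_mod_cast Int.natCast_nonneg _
        simp only [List.foldl_cons, ih, List.map_cons, List.sum_cons,
          PySem.List.slice_to _ hnn, sizeSum]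
        ring
  simpa using hgen (PySem.Set.ofList (customers.map Prod.fst)) 0

-- ===== VERDICT (by name: the statement is the Claim_ definition above) =====
theorem rakein_spec : Claim_equal_rakein := by
  intro shoes customers _
  unfold Spec_rakein
  rw [altB_eq]
  unfold rakein
  rw [loopA_eq customers (PySem.Dict.counter shoes) 0
    (PySem.Set.ofList (customers.map Prod.fst))
    (PySem.Set.nodup_ofList _)
    (fun c hc => (PySem.Set.mem_ofList _ _).mpr (List.mem_map_of_mem hc))
    (fun s => by rw [PySem.Dict.getD_counter]; exact_mod_cast Int.natCast_nonneg _)]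
  simp
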